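-- pv_equiv track=rewrite | github.com/123pyLeo/sciagent | sciagent/guardian.py | _auto_detect_primary_metric
-- ===== SOURCE A (Python) =====
-- from typing import Dict, Optional
--
-- def _auto_detect_primary_metric(metrics: Dict[str, float]) -> Optional[str]:
--     """
--     智能检测主要指标
--     优先级：
--     1. 常见的性能指标（accuracy, f1, precision, recall, auc等）
--     2. 损失类指标（loss, error等）
--     3. 其他指标（按字典序第一个）
--     """
--     if not metrics:
--         return None
--
--     metric_names = list(metrics.keys())
--
--     # 优先级1：常见性能指标（越高越好）
--     priority_metrics = ['accuracy', 'acc', 'f1_score', 'f1', 'precision', 'recall', 'auc', 'map', 'ap']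
--     for metric in priority_metrics:
--         for name in metric_names:
--             if metric in name.lower():
--                 return name
--
--     # 优先级2：损失类指标（越低越好）
--     loss_metrics = ['loss', 'error', 'mse', 'mae', 'rmse']
--     for metric in loss_metrics:
--         for name in metric_names:
--             if metric in name.lower():
--                 return name
--
--     # 优先级3：返回第一个
--     return metric_names[0]
-- ===== SOURCE B (Python) =====
-- from typing import Dict, Optional
--
-- _COMBINED = ['accuracy', 'acc', 'f1_score', 'f1', 'precision', 'recall',
--              'auc', 'map', 'ap', 'loss', 'error', 'mse', 'mae', 'rmse']
--
--
-- def _rank(lowered):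
--     """Position of the first ranked token contained in the lowered name
--     (len(_COMBINED) when none matches)."""
--     for i, tok in enumerate(_COMBINED):
--         if tok in lowered:
--             return i
--     return len(_COMBINED)
--
--
-- def _auto_detect_primary_metric(metrics: Dict[str, float]) -> Optional[str]:
--     if not metrics:
--         return None
--     names = list(metrics.keys())
--     best = names[0]
--     best_rank = _rank(best.lower())
--     for name in names[1:]:
--         r = _rank(name.lower())
--         if r < best_rank:
--             best, best_rank = name, r
--     return best
-- ===== Notes on version B (the rewrite author's own statement) =====
-- stated objective: alternative
-- what changed: Replaces A's priority-outer/name-inner nested scans by a single pass over the names, tracking the argmin of each name's priority rank (first matching index in the concatenated token list), with first-occurrence tie-breaking.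
import Mathlib
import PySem

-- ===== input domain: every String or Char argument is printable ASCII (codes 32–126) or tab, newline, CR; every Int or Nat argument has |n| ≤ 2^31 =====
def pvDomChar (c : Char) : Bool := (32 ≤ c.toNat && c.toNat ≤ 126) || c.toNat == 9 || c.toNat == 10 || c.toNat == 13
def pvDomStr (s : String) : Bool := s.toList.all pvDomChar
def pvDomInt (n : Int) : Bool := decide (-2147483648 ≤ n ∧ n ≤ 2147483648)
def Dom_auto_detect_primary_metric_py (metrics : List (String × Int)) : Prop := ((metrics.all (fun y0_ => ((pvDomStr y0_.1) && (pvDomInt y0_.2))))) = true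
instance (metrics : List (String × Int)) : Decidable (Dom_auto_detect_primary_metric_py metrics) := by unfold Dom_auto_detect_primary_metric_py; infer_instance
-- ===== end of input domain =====

-- B replaces A's priority-outer/name-inner nested scans by one pass over the names
-- tracking the argmin of each name's priority rank (objective: alternative algorithm).


-- ===== PORT A =====
-- 'for metric in tokens: for name in names: if metric in name.lower(): return name'
def pvLoopA (tokens : List String) (names : List String) : Option String :=
  match tokens with
  | [] => none
  | t :: ts =>
    match names.find? (fun name => PySem.Str.isIn t (PySem.Str.lower name)) with
    | some n => some n
    | none => pvLoopA ts names

def auto_detect_primary_metric_py (metrics : List (String × Int)) : Option String :=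
  match metrics with
  | [] => none
  | m :: rest =>
    let metric_names := m.1 :: rest.map Prod.fst
    let priority_metrics := ["accuracy", "acc", "f1_score", "f1", "precision", "recall", "auc", "map", "ap"]
    let loss_metrics := ["loss", "error", "mse", "mae", "rmse"]
    match pvLoopA priority_metrics metric_names with
    | some n => some n
    | none =>
      match pvLoopA loss_metrics metric_names with
      | some n => some n
      | none => some m.1

-- ===== PORT B =====
-- index of the first token contained in the lowered name; list length if none
def pvRankB (tokens : List String) (lowered : String) : Nat :=
  match tokens with
  | [] => 0
  | t :: ts => if PySem.Str.isIn t lowered then 0 else pvRankB ts lowered + 1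

def pvCombined : List String :=
  ["accuracy", "acc", "f1_score", "f1", "precision", "recall", "auc", "map", "ap",
   "loss", "error", "mse", "mae", "rmse"]

def auto_detect_primary_metric_py_alt (metrics : List (String × Int)) : Option String :=
  match metrics with
  | [] => none
  | m :: rest =>
    let r0 := pvRankB pvCombined (PySem.Str.lower m.1)
    let best := rest.foldl
      (fun (p : String × Nat) q =>
        let r := pvRankB pvCombined (PySem.Str.lower q.1)
        if r < p.2 then (q.1, r) else p)
      (m.1, r0)
    some best.1

-- ===== PRECONDITION & SPEC =====
def Spec_auto_detect_primary_metric_py (metrics : List (String × Int)) (out : Option String) : Prop := out = auto_detect_primary_metric_py_alt metrics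
instance (metrics : List (String × Int)) (out : Option String) : Decidable (Spec_auto_detect_primary_metric_py metrics out) := by unfold Spec_auto_detect_primary_metric_py; infer_instance

-- ===== CLAIM (what is proved, stated in full; the proofs are below) =====
def Claim_equal_auto_detect_primary_metric_py : Prop := ∀ (metrics : List (String × Int)), Dom_auto_detect_primary_metric_py metrics → Spec_auto_detect_primary_metric_py metrics (auto_detect_primary_metric_py metrics)

-- ===== LEMMAS AND PROOFS =====

-- abstract "first argmin" recursion that both sides are reduced to
def pvFM (r : String → Nat) (b : String) : List String → String
  | [] => b
  | n :: ns => if r n < r b then pvFM r n ns else pvFM r b ns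

theorem pvFM_min {r : String → Nat} {b : String} {ns : List String}
    (h : ∀ x ∈ ns, ¬ r x < r b) : pvFM r b ns = b := by
  induction ns with
  | nil => rfl
  | cons x xs ih =>
    simp only [pvFM]
    rw [if_neg (h x (by simp))]
    exact ih (fun y hy => h y (by simp [hy]))

theorem pvFM_zero {r : String → Nat} {b : String} (hb : r b = 0) (ns : List String) :
    pvFM r b ns = b :=
  pvFM_min (fun x _ => by omega)

theorem pvFM_congr {r₁ r₂ : String → Nat} : ∀ {b : String} {ns : List String},
    (∀ x ∈ b :: ns, r₁ x = r₂ x) → pvFM r₁ b ns = pvFM r₂ b ns := by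
  intro b ns
  induction ns generalizing b with
  | nil => intro _; rfl
  | cons x xs ih =>
    intro h
    have hb := h b (by simp)
    have hx := h x (by simp)
    have h1 : ∀ y ∈ x :: xs, r₁ y = r₂ y := by
      intro y hy
      rcases List.mem_cons.1 hy with h' | h'
      · exact h' ▸ hx
      · exact h y (by simp [h'])
    have h2 : ∀ y ∈ b :: xs, r₁ y = r₂ y := by
      intro y hy
      rcases List.mem_cons.1 hy with h' | h'
      · exact h' ▸ hb
      · exact h y (by simp [h'])
    simp only [pvFM, hb, hx]
    split
    · exact ih h1
    · exact ih h2

theorem pvFM_succ {r : String → Nat} : ∀ {b : String} (ns : List String),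
    pvFM (fun n => r n + 1) b ns = pvFM r b ns := by
  intro b ns
  induction ns generalizing b with
  | nil => rfl
  | cons x xs ih => simp only [pvFM, Nat.add_lt_add_iff_right]; split <;> exact ih

-- find? of the zero-rank predicate computes the first argmin when a zero rank exists
theorem pvFM_find_zero {r : String → Nat} : ∀ {ns : List String} {b m : String},
    (b :: ns).find? (fun n => r n == 0) = some m → pvFM r b ns = m := by
  intro ns
  induction ns with
  | nil =>
    intro b m h
    by_cases hb : r b = 0
    · rw [List.find?_cons_of_pos (by simpa using hb)] at h
      cases h
      rfl
    · rw [List.find?_cons_of_neg (by simpa using hb)] at h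
      simp at h
  | cons x xs ih =>
    intro b m h
    by_cases hb : r b = 0
    · rw [List.find?_cons_of_pos (by simpa using hb)] at h
      cases h
      exact pvFM_zero hb _
    · rw [List.find?_cons_of_neg (by simpa using hb)] at h
      simp only [pvFM]
      by_cases hx : r x = 0
      · rw [List.find?_cons_of_pos (by simpa using hx)] at h
        cases h
        rw [if_pos (by omega)]
        exact pvFM_zero hx xs
      · rw [List.find?_cons_of_neg (by simpa using hx)] at h
        split
        · exact ih (by rw [List.find?_cons_of_neg (by simpa using hx)]; exact h)
        · exact ih (by rw [List.find?_cons_of_neg (by simpa using hb)]; exact h)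

-- A's concatenated token loop equals the first argmin of pvRankB
theorem pvLoopA_fm : ∀ (c : List String) (b : String) (ns : List String),
    (match pvLoopA c (b :: ns) with
     | some n => some n
     | none => some b)
      = some (pvFM (fun n => pvRankB c (PySem.Str.lower n)) b ns) := by
  intro c
  induction c with
  | nil =>
    intro b ns
    simp only [pvLoopA]
    rw [pvFM_min (fun x _ => by simp [pvRankB])]
  | cons t ts ih =>
    intro b ns
    simp only [pvLoopA]
    rcases hf : (b :: ns).find? (fun name => PySem.Str.isIn t (PySem.Str.lower name)) with _ | m
    · -- no name contains t: every rank is a successor rank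
      have hall := List.find?_eq_none.1 hf
      have hcg : pvFM (fun n => pvRankB (t :: ts) (PySem.Str.lower n)) b ns
          = pvFM (fun n => pvRankB ts (PySem.Str.lower n) + 1) b ns := by
        apply pvFM_congr
        intro x hx
        have hfx : PySem.Chars.isIn t.toList (PySem.Chars.lower x.toList) = false := by
          simpa using hall x hx
        simp [pvRankB, hfx]
      rw [hcg, pvFM_succ]
      exact ih b ns
    · -- first name containing t wins: its rank is 0, earlier ranks are positive
      have hf' : (b :: ns).find? (fun n => (pvRankB (t :: ts) (PySem.Str.lower n) == 0)) = some m := by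
        have hpe : (fun n => (pvRankB (t :: ts) (PySem.Str.lower n) == 0))
            = (fun name => PySem.Str.isIn t (PySem.Str.lower name)) := by
          funext n
          simp only [pvRankB]
          rcases hni : PySem.Str.isIn t (PySem.Str.lower n) <;> simp_all
        rw [hpe]
        exact hf
      rw [pvFM_find_zero hf']

-- B's fold computes the first argmin of pvRankB (paired with its rank)
theorem pvFoldB_fm (r : String → Nat) : ∀ (l : List (String × Int)) (b : String),
    l.foldl (fun (p : String × Nat) q => if r q.1 < p.2 then (q.1, r q.1) else p) (b, r b)
      = (pvFM r b (l.map Prod.fst), r (pvFM r b (l.map Prod.fst))) := by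
  intro l
  induction l with
  | nil => intro b; rfl
  | cons q qs ih =>
    intro b
    simp only [List.foldl, List.map, pvFM]
    split
    · exact ih _
    · exact ih _

-- A's cascaded loops over the two token lists = one loop over their concatenation
theorem pvLoopA_append (c₁ c₂ : List String) (names : List String) :
    (match pvLoopA c₁ names with
     | some n => some n
     | none => pvLoopA c₂ names) = pvLoopA (c₁ ++ c₂) names := by
  induction c₁ with
  | nil => rfl
  | cons t ts ih =>
    simp only [pvLoopA, List.cons_append]
    rcases hf : names.find? (fun name => PySem.Str.isIn t (PySem.Str.lower name)) with _ | m
    · exact ih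
    · rfl

theorem pvLoopA_combined (names : List String) :
    pvLoopA pvCombined names
      = (match pvLoopA ["accuracy", "acc", "f1_score", "f1", "precision", "recall", "auc", "map", "ap"] names with
         | some n => some n
         | none => pvLoopA ["loss", "error", "mse", "mae", "rmse"] names) := by
  have h : pvCombined
      = ["accuracy", "acc", "f1_score", "f1", "precision", "recall", "auc", "map", "ap"]
        ++ ["loss", "error", "mse", "mae", "rmse"] := rfl
  rw [h]
  exact (pvLoopA_append _ _ names).symm

-- ===== VERDICT (by name: the statement is the Claim_ definition above) =====
theorem auto_detect_primary_metric_py_spec : Claim_equal_auto_detect_primary_metric_py := by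
  intro metrics _
  unfold Spec_auto_detect_primary_metric_py
  match metrics with
  | [] => rfl
  | m :: rest =>
    simp only [auto_detect_primary_metric_py, auto_detect_primary_metric_py_alt]
    rw [pvFoldB_fm (fun n => pvRankB pvCombined (PySem.Str.lower n)) rest m.1]
    have key := pvLoopA_fm pvCombined m.1 (rest.map Prod.fst)
    rw [pvLoopA_combined (m.1 :: rest.map Prod.fst)] at key
    rcases hp : pvLoopA ["accuracy", "acc", "f1_score", "f1", "precision", "recall", "auc", "map", "ap"]
        (m.1 :: rest.map Prod.fst) with _ | n₁
    · rw [hp] at key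
      rcases hl : pvLoopA ["loss", "error", "mse", "mae", "rmse"] (m.1 :: rest.map Prod.fst) with _ | n₂ <;>
        rw [hl] at key <;> exact key
    · rw [hp] at key
      exact key
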